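-- pv_equiv track=rewrite | github.com/ArknightsAutoHelper/ArknightsAutoHelper | Arknights/addons/contrib/activity/__init__.py | process_stages
-- ===== SOURCE A (Python) =====
-- def process_stages(stages):
--     stage_code_map = {}
--     zone_linear_map = {}
--     for stage_id in stages.keys():
--         stage = stages[stage_id]
--         if stage_code_map.get(stage['code']) is not None:
--             continue
--         stage_code_map[stage['code']] = stage
--         l = zone_linear_map.get(stage['zoneId'], [])
--         l.append(stage['code'])
--         zone_linear_map[stage['zoneId']] = l
--     return stage_code_map, zone_linear_map
-- ===== SOURCE B (Python) =====
-- def process_stages(stages):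
--     # index-build-then-group decomposition: dedupe by code first, then group codes by zone
--     stage_code_map = {}
--     for stage in stages.values():
--         stage_code_map.setdefault(stage['code'], stage)
--     zone_linear_map = {}
--     for code, stage in stage_code_map.items():
--         zone_linear_map.setdefault(stage['zoneId'], []).append(code)
--     return stage_code_map, zone_linear_map
-- ===== Notes on version B (the rewrite author's own statement) =====
-- stated objective: idiomatic
-- what changed: Replaces A's single interleaved pass maintaining both maps with an index-build-then-group decomposition: one setdefault pass dedupes stages by code, then a second pass over the deduped map groups codes by zoneId.
import Mathlib
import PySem

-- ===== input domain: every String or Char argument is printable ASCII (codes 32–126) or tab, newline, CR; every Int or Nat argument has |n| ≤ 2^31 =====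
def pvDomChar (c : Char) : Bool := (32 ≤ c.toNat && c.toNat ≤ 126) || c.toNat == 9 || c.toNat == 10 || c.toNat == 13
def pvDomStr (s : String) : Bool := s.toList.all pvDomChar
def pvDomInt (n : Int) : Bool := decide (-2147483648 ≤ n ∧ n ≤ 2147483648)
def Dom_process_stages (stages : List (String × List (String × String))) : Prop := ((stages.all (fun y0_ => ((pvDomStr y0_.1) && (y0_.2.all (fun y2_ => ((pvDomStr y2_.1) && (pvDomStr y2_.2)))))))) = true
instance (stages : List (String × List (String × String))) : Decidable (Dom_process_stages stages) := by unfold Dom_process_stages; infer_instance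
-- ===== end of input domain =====

-- B replaces A's single interleaved pass with an index-build-then-group decomposition (same cost);
-- equivalence is about the return value (neither version mutates its argument).

-- ===== PORT A =====
-- one loop body step of A: state = (stage_code_map, zone_linear_map);
-- stage['code'] / stage['zoneId'] would be a KeyError when absent — Pre_ excludes that, so getD "" is unreachable there
def pvA_step (acc : PySem.Dict String (PySem.Dict String String) × PySem.Dict String (List String))
    (p : String × List (String × String)) :
    PySem.Dict String (PySem.Dict String String) × PySem.Dict String (List String) :=
  let stage := PySem.Dict.ofList p.2
  let code := stage.getD "code" ""
  if (acc.1.get? code).isSome then acc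
  else
    let scm := acc.1.insert code stage
    let zid := stage.getD "zoneId" ""
    let l := acc.2.getD zid []
    (scm, acc.2.insert zid (l ++ [code]))

def process_stages (stages : List (String × List (String × String))) :
    (List (String × List (String × String))) × (List (String × List String)) :=
  -- 'for stage_id in stages.keys(): stage = stages[stage_id]' = iterate the dict's items
  let res := (PySem.Dict.ofList stages).items.foldl pvA_step (PySem.Dict.empty, PySem.Dict.empty)
  (res.1.items.map (fun q => (q.1, q.2.items)), res.2.items)

-- ===== PORT B =====
-- first pass: stage_code_map.setdefault(stage['code'], stage)  (first wins)
def pvB_index (scm : PySem.Dict String (PySem.Dict String String)) (st : List (String × String)) :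
    PySem.Dict String (PySem.Dict String String) :=
  let stage := PySem.Dict.ofList st
  scm.setdefault (stage.getD "code" "") stage
-- second pass: zone_linear_map.setdefault(stage['zoneId'], []).append(code)
-- (in-place append on the setdefault result = overwrite at that key, position preserved either way)
def pvB_group (zlm : PySem.Dict String (List String)) (q : String × PySem.Dict String String) :
    PySem.Dict String (List String) :=
  let zid := q.2.getD "zoneId" ""
  zlm.insert zid (zlm.getD zid [] ++ [q.1])

def process_stages_alt (stages : List (String × List (String × String))) :
    (List (String × List (String × String))) × (List (String × List String)) :=
  let scm := (PySem.Dict.ofList stages).values.foldl pvB_index PySem.Dict.empty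
  let zlm := scm.items.foldl pvB_group PySem.Dict.empty
  (scm.items.map (fun q => (q.1, q.2.items)), zlm.items)

-- ===== PRECONDITION & SPEC =====
-- Pre_ excludes inputs where a stage dict lacks the 'code' or 'zoneId' key: A raises KeyError on a
-- missing 'code', and on a missing 'zoneId' too unless that stage's code happens to duplicate an
-- earlier one (that accidental corner is excluded with the rest for a uniform key requirement).
def Pre_process_stages (stages : List (String × List (String × String))) : Prop :=
  ∀ p ∈ (PySem.Dict.ofList stages).items,
    "code" ∈ (PySem.Dict.ofList p.2).keys ∧ "zoneId" ∈ (PySem.Dict.ofList p.2).keys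
instance (stages : List (String × List (String × String))) : Decidable (Pre_process_stages stages) := by
  unfold Pre_process_stages; infer_instance

def pvWitness_process_stages : (List (String × List (String × String))) :=
  [("main_01-07", [("code", "1-7"), ("zoneId", "main_1")]),
   ("main_01-08", [("code", "1-8"), ("zoneId", "main_1")])]

def Spec_process_stages (stages : List (String × List (String × String))) (out : (List (String × List (String × String))) × (List (String × List String))) : Prop := out = process_stages_alt stages
instance (stages : List (String × List (String × String))) (out : (List (String × List (String × String))) × (List (String × List String))) : Decidable (Spec_process_stages stages out) := by unfold Spec_process_stages; infer_instance

-- ===== CLAIM (what is proved, stated in full; the proofs are below) =====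
def Claim_equal_process_stages : Prop := ∀ (stages : List (String × List (String × String))), Dom_process_stages stages → Pre_process_stages stages → Spec_process_stages stages (process_stages stages)

-- ===== LEMMAS AND PROOFS =====

-- B's second pass, as a function of the stage_code_map
def pvZOf (scm : PySem.Dict String (PySem.Dict String String)) : PySem.Dict String (List String) :=
  scm.items.foldl pvB_group PySem.Dict.empty

-- invariant of A's interleaved loop: its zone map is always pvZOf of its code map
theorem pvA_main (L : List (String × List (String × String)))
    (scm : PySem.Dict String (PySem.Dict String String)) :
    L.foldl pvA_step (scm, pvZOf scm) =
      (L.foldl (fun s p => pvB_index s p.2) scm,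
       pvZOf (L.foldl (fun s p => pvB_index s p.2) scm)) := by
  induction L generalizing scm with
  | nil => rfl
  | cons p L ih =>
    simp only [List.foldl_cons]
    by_cases h : (scm.get? ((PySem.Dict.ofList p.2).getD "code" "")).isSome
    · have hc : scm.contains ((PySem.Dict.ofList p.2).getD "code" "") = true := by
        rw [PySem.Dict.contains_eq_isSome_get?]; exact h
      have hA : pvA_step (scm, pvZOf scm) p = (scm, pvZOf scm) := by
        simp [pvA_step, h]
      have hB : pvB_index scm p.2 = scm := by
        simp [pvB_index, PySem.Dict.setdefault_of_contains (h := hc)]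
      rw [hA, hB]; exact ih scm
    · have hc : scm.contains ((PySem.Dict.ofList p.2).getD "code" "") = false := by
        rw [PySem.Dict.contains_eq_isSome_get?]; simpa using h
      have hB : pvB_index scm p.2 =
          scm.insert ((PySem.Dict.ofList p.2).getD "code" "") (PySem.Dict.ofList p.2) := by
        simp [pvB_index, PySem.Dict.setdefault_of_not_contains (h := hc)]
      have hz : pvZOf (pvB_index scm p.2) =
          pvB_group (pvZOf scm) ((PySem.Dict.ofList p.2).getD "code" "", PySem.Dict.ofList p.2) := by
        rw [hB]; unfold pvZOf
        rw [PySem.Dict.items_insert_of_not_contains (h := hc), List.foldl_append]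
        rfl
      have hA : pvA_step (scm, pvZOf scm) p = (pvB_index scm p.2, pvZOf (pvB_index scm p.2)) := by
        rw [hz, hB]; simp [pvA_step, h, pvB_group]
      rw [hA]
      exact ih (pvB_index scm p.2)

-- ===== VERDICT (by name: the statement is the Claim_ definition above) =====
theorem process_stages_spec : Claim_equal_process_stages := by
  intro stages _ _
  unfold Spec_process_stages process_stages process_stages_alt
  have hv : (PySem.Dict.ofList stages).values.foldl pvB_index PySem.Dict.empty =
      (PySem.Dict.ofList stages).items.foldl (fun s p => pvB_index s p.2) PySem.Dict.empty := by
    simp only [PySem.Dict.values, List.foldl_map]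
  have hz0 : pvZOf PySem.Dict.empty = PySem.Dict.empty := rfl
  have := pvA_main (PySem.Dict.ofList stages).items PySem.Dict.empty
  rw [hz0] at this
  simp only [this, hv, pvZOf]
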